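-- pv_equiv track=rewrite | github.com/pypi-data/pypi-mirror-400 | packages/rxiv-maker/rxiv_maker-1.18.2-py3-none-any.whl/rxiv_maker/validators/citation_validator.py | _is_position_in_code_span
-- ===== SOURCE A (Python) =====
-- def _is_position_in_code_span(line: str, position: int) -> bool:
--     """Check if a position in a line is inside a code span (backticks)."""
--     # Find all backtick pairs in the line
--     backtick_ranges = []
--     in_backtick = False
--     start_pos = 0
--
--     for i, char in enumerate(line):
--         if char == "`":
--             if not in_backtick:
--                 start_pos = i
--                 in_backtick = True
--             else:
--                 # End of backtick span
--                 backtick_ranges.append((start_pos, i))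
--                 in_backtick = False
--
--     # Check if position is inside any backtick range
--     return any(start <= position <= end for start, end in backtick_ranges)
-- ===== SOURCE B (Python) =====
-- def _is_position_in_code_span(line: str, position: int) -> bool:
--     """Check if a position in a line is inside a code span (backticks)."""
--     # Parity counting: classify every backtick as before / at / after the position.
--     before = 0
--     at = False
--     after = 0
--     for i, ch in enumerate(line):
--         if ch == "`":
--             if i < position:
--                 before += 1
--             elif i == position:
--                 at = True
--             else:
--                 after += 1
--     if at:
--         # the backtick at `position` closes a span (odd # before) or opens one with a partner after
--         return before % 2 == 1 or after > 0
--     # strictly inside: an odd number of backticks precede it and a closing one follows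
--     return before % 2 == 1 and after > 0
-- ===== Notes on version B (the rewrite author's own statement) =====
-- stated objective: alternative
-- what changed: Instead of building the list of backtick span ranges with an in_backtick state machine and testing membership in each span, B never constructs spans at all: it classifies each backtick as before/at/after the position and decides by parity (position is in a span iff an odd number of backticks precede it and a closing backtick exists, with the at-position case handled by the same counts).
import Mathlib
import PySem

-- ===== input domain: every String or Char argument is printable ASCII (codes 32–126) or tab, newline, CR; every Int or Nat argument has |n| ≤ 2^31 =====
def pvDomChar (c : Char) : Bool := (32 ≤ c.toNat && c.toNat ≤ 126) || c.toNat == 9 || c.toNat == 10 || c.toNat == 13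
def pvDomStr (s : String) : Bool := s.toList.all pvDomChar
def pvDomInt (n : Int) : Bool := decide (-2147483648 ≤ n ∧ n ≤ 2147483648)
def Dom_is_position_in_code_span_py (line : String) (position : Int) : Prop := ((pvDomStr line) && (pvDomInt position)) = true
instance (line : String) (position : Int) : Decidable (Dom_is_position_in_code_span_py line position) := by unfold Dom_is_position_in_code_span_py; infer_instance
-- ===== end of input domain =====

-- B replaces A's span-building state machine by parity counting (backticks before / at / after the position); alternative decomposition, same cost.


-- ===== PORT A =====
-- one step of A's for-loop: state = (backtick_ranges, in_backtick, start_pos)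
def pvStepA (s : List (Int × Int) × Bool × Int) (p : Int × Char) : List (Int × Int) × Bool × Int :=
  if p.2 = '`' then
    if s.2.1 = false then (s.1, true, p.1)
    else (s.1 ++ [(s.2.2, p.1)], false, s.2.2)
  else s

def is_position_in_code_span_py (line : String) (position : Int) : Bool :=
  (((PySem.List.enumerate line.toList).foldl pvStepA ([], false, 0)).1).any
    (fun r => decide (r.1 ≤ position ∧ position ≤ r.2))

-- ===== PORT B =====
-- one step of B's for-loop: state = (before, at, after)
def pvStepB (pos : Int) (s : Int × Bool × Int) (p : Int × Char) : Int × Bool × Int :=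
  if p.2 = '`' then
    if p.1 < pos then (s.1 + 1, s.2.1, s.2.2)
    else if p.1 = pos then (s.1, true, s.2.2)
    else (s.1, s.2.1, s.2.2 + 1)
  else s

def is_position_in_code_span_py_alt (line : String) (position : Int) : Bool :=
  match (PySem.List.enumerate line.toList).foldl (pvStepB position) (0, false, 0) with
  | (before, at_, after) =>
    if at_ then (PySem.Int.mod before 2 == 1) || decide (after > 0)
    else (PySem.Int.mod before 2 == 1) && decide (after > 0)

-- ===== PRECONDITION & SPEC =====
def Spec_is_position_in_code_span_py (line : String) (position : Int) (out : Bool) : Prop := out = is_position_in_code_span_py_alt line position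
instance (line : String) (position : Int) (out : Bool) : Decidable (Spec_is_position_in_code_span_py line position out) := by unfold Spec_is_position_in_code_span_py; infer_instance

-- ===== CLAIM (what is proved, stated in full; the proofs are below) =====
def Claim_equal_is_position_in_code_span_py : Prop := ∀ (line : String) (position : Int), Dom_is_position_in_code_span_py line position → Spec_is_position_in_code_span_py line position (is_position_in_code_span_py line position)

-- ===== LEMMAS AND PROOFS =====
-- the (Int) indices of the backticks, in order
def pvTicksFM (l : List (Int × Char)) : List Int :=
  l.filterMap (fun p => if p.2 = '`' then some p.1 else none)

def pvPairUp : List Int → List (Int × Int)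
  | a :: b :: r => (a, b) :: pvPairUp r
  | _ => []

def pvPairOdd (sp : Int) : List Int → List (Int × Int)
  | [] => []
  | a :: r => (sp, a) :: pvPairUp r

theorem pvPairUp_cons (i : Int) (t : List Int) : pvPairUp (i :: t) = pvPairOdd i t := by
  cases t <;> simp [pvPairUp, pvPairOdd]

-- A's accumulated ranges are the consecutive pairs of the tick list
theorem pvFoldA_ranges (l : List (Int × Char)) : ∀ (acc : List (Int × Int)) (b : Bool) (sp : Int),
    (l.foldl pvStepA (acc, b, sp)).1
      = acc ++ (if b then pvPairOdd sp (pvTicksFM l) else pvPairUp (pvTicksFM l)) := by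
  induction l with
  | nil => intro acc b sp; cases b <;> simp [pvTicksFM, pvPairUp, pvPairOdd]
  | cons p l ih =>
    intro acc b sp
    by_cases hc : p.2 = '`'
    · cases b with
      | false => simp [List.foldl, pvStepA, hc, ih, pvTicksFM, pvPairUp_cons]
      | true => simp [List.foldl, pvStepA, hc, ih, pvTicksFM, pvPairOdd]
    · simp [List.foldl, pvStepA, hc, ih, pvTicksFM]

-- B's fold computes the three classification counts of the tick list
theorem pvFoldB_counts (pos : Int) (l : List (Int × Char)) :
    ∀ (c1 : Int) (b : Bool) (c2 : Int),
    l.foldl (pvStepB pos) (c1, b, c2)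
      = (c1 + ((pvTicksFM l).countP (fun t => decide (t < pos)) : Int),
         b || (pvTicksFM l).any (fun t => decide (t = pos)),
         c2 + ((pvTicksFM l).countP (fun t => decide (pos < t)) : Int)) := by
  induction l with
  | nil => intro c1 b c2; simp [pvTicksFM]
  | cons p l ih =>
    intro c1 b c2
    by_cases hc : p.2 = '`'
    · rcases lt_trichotomy p.1 pos with h | h | h
      · have h1 : ¬ p.1 = pos := by omega
        have h2 : ¬ pos < p.1 := by omega
        simp [List.foldl, pvStepB, hc, h, h1, h2, ih, pvTicksFM]
        omega
      · simp [List.foldl, pvStepB, hc, h, ih, pvTicksFM]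
      · have h1 : ¬ p.1 < pos := by omega
        have h2 : ¬ p.1 = pos := by omega
        simp [List.foldl, pvStepB, hc, h, h1, h2, ih, pvTicksFM]
        omega
    · simp [List.foldl, pvStepB, hc, ih, pvTicksFM]

-- the counting formula B evaluates, on the Nat side
def pvFormula (t : List Int) (pos : Int) : Bool :=
  if t.any (fun x => decide (x = pos)) then
    (t.countP (fun x => decide (x < pos)) % 2 == 1) || (t.countP (fun x => decide (pos < x)) != 0)
  else
    (t.countP (fun x => decide (x < pos)) % 2 == 1) && (t.countP (fun x => decide (pos < x)) != 0)

-- the key fact: on a strictly increasing tick list, span membership = the parity formula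
theorem pvKey (pos : Int) : ∀ (t : List Int), t.Pairwise (· < ·) →
    (pvPairUp t).any (fun r => decide (r.1 ≤ pos ∧ pos ≤ r.2)) = pvFormula t pos
  | [], _ => by simp [pvPairUp, pvFormula]
  | [a], _ => by
    rcases lt_trichotomy a pos with h | h | h
    · simp [pvPairUp, pvFormula, h, show ¬ pos < a by omega,
        show ¬ a = pos by omega]
    · simp [pvPairUp, pvFormula, h]
    · simp [pvPairUp, pvFormula, List.countP_cons, show ¬ a < pos by omega,
        show ¬ a = pos by omega]
  | a :: b :: r, h => by
    have hab : a < b := (List.pairwise_cons.1 h).1 b (by simp)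
    have hr' : (b :: r).Pairwise (· < ·) := (List.pairwise_cons.1 h).2
    have hbr : ∀ x ∈ r, b < x := fun x hx => (List.pairwise_cons.1 hr').1 x hx
    have hr : r.Pairwise (· < ·) := (List.pairwise_cons.1 hr').2
    have ih := pvKey pos r hr
    simp only [pvPairUp, List.any_cons, ih]
    rcases lt_trichotomy pos a with h1 | h1 | h1
    · -- pos before both ticks: everything is after pos, both sides false
      have hany : r.any (fun x => decide (x = pos)) = false := by
        simp only [List.any_eq_false]; intro x hx
        have := hbr x hx; simp; omega
      have hcl : r.countP (fun x => decide (x < pos)) = 0 := by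
        apply List.countP_eq_zero.2; intro x hx; have := hbr x hx; simp; omega
      simp [pvFormula, List.countP_cons, hany, hcl, show ¬ a ≤ pos by omega,
        show ¬ a < pos by omega, show ¬ a = pos by omega,
        show ¬ b < pos by omega, show ¬ b = pos by omega]
    · -- pos = a: opening tick whose partner is b
      have hcl : (a :: b :: r).countP (fun x => decide (x < pos)) = 0 := by
        apply List.countP_eq_zero.2; intro x hx
        simp only [List.mem_cons] at hx
        rcases hx with rfl | rfl | hx
        · simp; omega
        · simp; omega
        · have := hbr x hx; simp; omega
      simp only [pvFormula, List.any_cons, show a = pos by omega, decide_true,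
        Bool.true_or, if_true, List.countP_cons]
      simp [show pos ≤ b by omega, show pos < b by omega]
    rcases lt_trichotomy pos b with h2 | h2 | h2
    · -- a < pos < b: strictly inside the first span
      have hany : r.any (fun x => decide (x = pos)) = false := by
        simp only [List.any_eq_false]; intro x hx
        have := hbr x hx; simp; omega
      have hcl : r.countP (fun x => decide (x < pos)) = 0 := by
        apply List.countP_eq_zero.2; intro x hx; have := hbr x hx; simp; omega
      simp [pvFormula, hany, hcl, show a ≤ pos by omega,
        show pos ≤ b by omega, show a < pos by omega, show ¬ b < pos by omega,
        show ¬ a = pos by omega, show ¬ b = pos by omega, show pos < b by omega]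
    · -- pos = b: closing tick
      have hcl : r.countP (fun x => decide (x < pos)) = 0 := by
        apply List.countP_eq_zero.2; intro x hx; have := hbr x hx; simp; omega
      simp [pvFormula, hcl, show a ≤ pos by omega,
        show b = pos by omega, show a < pos by omega, show ¬ pos < a by omega]
    · -- pos after both ticks: the first pair is irrelevant, formula shifts by 2
      have hq : ¬ (a ≤ pos ∧ pos ≤ b) := by omega
      simp only [pvFormula, List.any_cons, List.countP_cons,
        show ¬ a = pos by omega, show ¬ b = pos by omega,
        show a < pos by omega, show b < pos by omega,
        show ¬ pos < a by omega, show ¬ pos < b by omega,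
        decide_false, decide_true, Bool.false_or, if_true, hq]
      by_cases hy : r.any (fun x => decide (x = pos)) <;>
        simp [hy, show (r.countP (fun x => decide (x < pos)) + 1 + 1) % 2
          = r.countP (fun x => decide (x < pos)) % 2 by omega]

-- strictly increasing indices survive the filterMap
theorem pvTicks_pairwise (l : List Char) (s : Int) :
    (pvTicksFM (PySem.List.enumerate l s)).Pairwise (· < ·) := by
  apply List.Pairwise.filterMap _ _ (PySem.List.pairwise_lt_enumerate l s)
  intro p q hpq x hx y hy
  by_cases hp : p.2 = '`' <;> by_cases hq2 : q.2 = '`' <;>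
    simp [hp, hq2] at hx hy
  omega

-- ===== VERDICT (by name: the statement is the Claim_ definition above) =====
theorem is_position_in_code_span_py_spec : Claim_equal_is_position_in_code_span_py := by
  intro line position _
  unfold Spec_is_position_in_code_span_py
  unfold is_position_in_code_span_py is_position_in_code_span_py_alt
  rw [pvFoldB_counts]
  have hA := pvFoldA_ranges (PySem.List.enumerate line.toList 0) [] false 0
  simp only [List.nil_append, Bool.false_eq_true, if_false] at hA
  rw [hA, pvKey position _ (pvTicks_pairwise line.toList 0)]
  unfold pvFormula
  set t := pvTicksFM (PySem.List.enumerate line.toList 0)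
  have hm : PySem.Int.mod (((t.countP (fun x => decide (x < position))) : Int)) 2
      = ((t.countP (fun x => decide (x < position)) % 2 : Nat) : Int) := by
    exact_mod_cast PySem.Int.mod_natCast (t.countP (fun x => decide (x < position))) 2
  have e1 : (((t.countP (fun x => decide (x < position)) % 2 : Nat) : Int) == 1)
      = (t.countP (fun x => decide (x < position)) % 2 == 1) := by
    rcases Nat.mod_two_eq_zero_or_one (t.countP (fun x => decide (x < position))) with h | h <;>
      simp [h]
  have e2 : (decide ((0 : Int) < (t.countP (fun x => decide (position < x)) : Int)))
      = (t.countP (fun x => decide (position < x)) != 0) := by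
    cases hn : t.countP (fun x => decide (position < x)) <;> simp
  simp only [zero_add, Bool.false_or, gt_iff_lt, hm, e1, e2]
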